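-- pv_equiv track=rewrite | github.com/mkeguy106/livestream.list.qt | src/livestream_list/chat/emotes/renderer.py | _split_with_positions
-- ===== SOURCE A (Python) =====
-- def _split_with_positions(text: str) -> list[tuple[str, int, int]]:
--     """Split text into words with their start/end positions."""
--     words: list[tuple[str, int, int]] = []
--     i = 0
--     n = len(text)
--     while i < n:
--         # Skip whitespace
--         while i < n and text[i] == " ":
--             i += 1
--         if i >= n:
--             break
--         # Find word end
--         start = i
--         while i < n and text[i] != " ":
--             i += 1
--         words.append((text[start:i], start, i))
--     return words
-- ===== SOURCE B (Python) =====
-- def _split_with_positions(text: str) -> list[tuple[str, int, int]]: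
--     """Split text into words with their start/end positions."""
--     words: list[tuple[str, int, int]] = []
--     pos = 0
--     for part in text.split(" "):
--         if part:
--             words.append((part, pos, pos + len(part)))
--         pos += len(part) + 1
--     return words
-- ===== Notes on version B (the rewrite author's own statement) =====
-- stated objective: idiomatic
-- what changed: Replaces the hand-written two-pointer whitespace-skip/word-scan with str.split on the single-space separator followed by one offset-accumulation pass that skips empty tokens and advances by len(part)+1 per delimiter.
import Mathlib
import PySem

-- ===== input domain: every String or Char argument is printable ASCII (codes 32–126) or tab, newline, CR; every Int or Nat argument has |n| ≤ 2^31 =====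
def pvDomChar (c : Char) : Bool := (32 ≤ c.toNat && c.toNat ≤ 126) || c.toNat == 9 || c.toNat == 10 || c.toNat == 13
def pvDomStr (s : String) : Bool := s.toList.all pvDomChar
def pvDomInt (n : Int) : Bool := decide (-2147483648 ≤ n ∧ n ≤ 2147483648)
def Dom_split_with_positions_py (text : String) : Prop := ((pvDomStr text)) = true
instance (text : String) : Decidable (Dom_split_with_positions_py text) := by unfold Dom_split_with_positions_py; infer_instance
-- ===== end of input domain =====

-- B replaces A's two-pointer whitespace-skip/word-scan with split-on-" " plus one offset-accumulation pass (same O(n) cost, more idiomatic).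


-- ===== PORT A =====
-- inner "while i < n and text[i] != ' '" word scan: returns (word, remaining chars)
def scanWordA : List Char → List Char × List Char
  | [] => ([], [])
  | c :: rest =>
    if c = ' ' then ([], c :: rest)
    else
      let p := scanWordA rest
      (c :: p.1, p.2)

theorem scanWordA_snd_length_le (cs : List Char) : (scanWordA cs).2.length ≤ cs.length := by
  induction cs with
  | nil => simp [scanWordA]
  | cons c rest ih =>
    simp only [scanWordA]
    split
    · simp
    · simpa using Nat.le_succ_of_le ih

-- outer while loop of A: skip spaces one at a time, else scan a word and append
def goA : List Char → Int → List (String × Int × Int)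
  | [], _ => []
  | c :: rest, i =>
    if c = ' ' then goA rest (i + 1)
    else
      let p := scanWordA rest
      (String.ofList (c :: p.1), i, i + 1 + p.1.length) :: goA p.2 (i + 1 + p.1.length)
termination_by cs _ => cs.length
decreasing_by
  · simp
  · exact Nat.lt_succ_of_le (scanWordA_snd_length_le rest)

def split_with_positions_py (text : String) : List (String × Int × Int) :=
  goA text.toList 0

-- ===== PORT B =====
def split_with_positions_py_alt (text : String) : List (String × Int × Int) :=
  ((PySem.Chars.splitOn text.toList [' ']).foldl
    (fun (st : List (String × Int × Int) × Int) (part : List Char) =>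
      (if part ≠ [] then st.1 ++ [(String.ofList part, st.2, st.2 + (part.length : Int))] else st.1,
       st.2 + (part.length : Int) + 1))
    ([], 0)).1

-- ===== PRECONDITION & SPEC =====
def Spec_split_with_positions_py (text : String) (out : List (String × Int × Int)) : Prop := out = split_with_positions_py_alt text
instance (text : String) (out : List (String × Int × Int)) : Decidable (Spec_split_with_positions_py text out) := by unfold Spec_split_with_positions_py; infer_instance

-- ===== CLAIM (what is proved, stated in full; the proofs are below) =====
def Claim_equal_split_with_positions_py : Prop := ∀ (text : String), Dom_split_with_positions_py text → Spec_split_with_positions_py text (split_with_positions_py text)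

-- ===== LEMMAS AND PROOFS =====

-- proof-side model of splitting on a single space
def mySplit : List Char → List (List Char)
  | [] => [[]]
  | c :: rest => if c = ' ' then [] :: mySplit rest else (mySplit rest).modifyHead (c :: ·)

theorem mySplit_ne_nil (cs : List Char) : mySplit cs ≠ [] := by
  cases cs with
  | nil => simp [mySplit]
  | cons c rest =>
    simp only [mySplit]
    split
    · simp
    · cases h : mySplit rest with
      | nil => exact absurd h (mySplit_ne_nil rest)
      | cons a t => simp

theorem go_spec : ∀ (fuel : Nat) (cs cur : List Char) (acc : List (List Char)),
    cs.length < fuel →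
    PySem.Chars.splitOn.go [' '] fuel cs cur acc
      = acc.reverse ++ (mySplit cs).modifyHead (cur.reverse ++ ·) := by
  intro fuel
  induction fuel with
  | zero => intro cs cur acc h; omega
  | succ f ih =>
    intro cs cur acc h
    cases cs with
    | nil => simp [PySem.Chars.splitOn.go, mySplit]
    | cons c rest =>
      by_cases hc : c = ' '
      · subst hc
        rw [show PySem.Chars.splitOn.go [' '] (f+1) (' ' :: rest) cur acc
              = PySem.Chars.splitOn.go [' '] f rest [] (cur.reverse :: acc) by
            simp [PySem.Chars.splitOn.go, List.isPrefixOf]]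
        rw [ih rest [] (cur.reverse :: acc) (by simpa using Nat.lt_of_succ_lt_succ h)]
        simp only [mySplit, if_pos, List.reverse_cons, List.reverse_nil, List.nil_append]
        cases mySplit rest <;> simp
      · rw [show PySem.Chars.splitOn.go [' '] (f+1) (c :: rest) cur acc
              = PySem.Chars.splitOn.go [' '] f rest (c :: cur) acc by
            simp [PySem.Chars.splitOn.go, List.isPrefixOf, Ne.symm hc]]
        rw [ih rest (c :: cur) acc (by simpa using Nat.lt_of_succ_lt_succ h)]
        simp only [mySplit, if_neg hc]
        congr 1
        cases hm : mySplit rest with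
        | nil => exact absurd hm (mySplit_ne_nil rest)
        | cons a t => simp

theorem splitOn_eq_mySplit (cs : List Char) :
    PySem.Chars.splitOn cs [' '] = mySplit cs := by
  rw [PySem.Chars.splitOn, go_spec (cs.length + 1) cs [] [] (Nat.lt_succ_self _)]
  cases hm : mySplit cs with
  | nil => exact absurd hm (mySplit_ne_nil cs)
  | cons a t => simp

-- the step function of B's fold, named for the proofs
def stepB (st : List (String × Int × Int) × Int) (part : List Char) : List (String × Int × Int) × Int :=
  (if part ≠ [] then st.1 ++ [(String.ofList part, st.2, st.2 + (part.length : Int))] else st.1,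
   st.2 + (part.length : Int) + 1)

theorem alt_eq_fold (text : String) :
    split_with_positions_py_alt text
      = ((mySplit text.toList).foldl stepB ([], 0)).1 := by
  rw [split_with_positions_py_alt, splitOn_eq_mySplit]
  rfl

theorem foldB_acc : ∀ (parts : List (List Char)) (acc : List (String × Int × Int)) (pos : Int),
    (parts.foldl stepB (acc, pos)).1 = acc ++ (parts.foldl stepB ([], pos)).1 := by
  intro parts
  induction parts with
  | nil => simp
  | cons p t ih =>
    intro acc pos
    simp only [List.foldl_cons, stepB, List.nil_append]
    by_cases hp : p = []
    · rw [if_neg (by simp [hp]), if_neg (by simp [hp])]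
      exact ih acc _
    · rw [if_pos (by simpa using hp), if_pos (by simpa using hp)]
      rw [ih (acc ++ _), ih [(String.ofList p, pos, pos + (p.length : Int))]]
      simp

theorem scanWordA_snd_space : ∀ (cs : List Char),
    (scanWordA cs).2 = [] ∨ ∃ r', (scanWordA cs).2 = ' ' :: r' := by
  intro cs
  induction cs with
  | nil => simp [scanWordA]
  | cons c rest ih =>
    simp only [scanWordA]
    split
    · next hc => exact Or.inr ⟨rest, by rw [hc]⟩
    · simpa using ih

theorem mySplit_scan (cs : List Char) :
    mySplit cs = (scanWordA cs).1 ::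
      (match (scanWordA cs).2 with
       | [] => []
       | _ :: r' => mySplit r') := by
  induction cs with
  | nil => simp [mySplit, scanWordA]
  | cons c rest ih =>
    by_cases hc : c = ' '
    · subst hc; simp [mySplit, scanWordA]
    · simp only [mySplit, scanWordA, if_neg hc]
      rw [ih]
      simp

theorem goA_eq_fold : ∀ (n : Nat) (cs : List Char), cs.length ≤ n → ∀ (pos : Int),
    goA cs pos = ((mySplit cs).foldl stepB ([], pos)).1 := by
  intro n
  induction n with
  | zero =>
    intro cs h pos
    have : cs = [] := List.eq_nil_of_length_eq_zero (Nat.le_zero.mp h)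
    subst this
    simp [goA, mySplit, stepB]
  | succ m ih =>
    intro cs h pos
    cases cs with
    | nil => simp [goA, mySplit, stepB]
    | cons c rest =>
      by_cases hc : c = ' '
      · subst hc
        rw [show goA (' ' :: rest) pos = goA rest (pos + 1) by simp [goA]]
        rw [ih rest (by simpa using Nat.le_of_succ_le_succ h) (pos + 1)]
        simp [mySplit, stepB]
      · rw [show goA (c :: rest) pos
              = (String.ofList (c :: (scanWordA rest).1), pos, pos + 1 + ((scanWordA rest).1.length : Int))
                  :: goA (scanWordA rest).2 (pos + 1 + ((scanWordA rest).1.length : Int)) by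
            rw [goA]; simp [hc]]
        have hm : mySplit (c :: rest)
            = (c :: (scanWordA rest).1) ::
              (match (scanWordA rest).2 with | [] => [] | _ :: r' => mySplit r') := by
          rw [mySplit_scan (c :: rest)]
          simp [scanWordA, hc]
        rw [hm]
        rw [List.foldl_cons]
        have hstep : stepB ([], pos) (c :: (scanWordA rest).1)
            = ([(String.ofList (c :: (scanWordA rest).1), pos, pos + 1 + ((scanWordA rest).1.length : Int))],
               pos + 1 + ((scanWordA rest).1.length : Int) + 1) := by
          simp only [stepB, ne_eq, List.nil_append, reduceCtorEq, not_false_eq_true, if_pos,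
            List.length_cons, Prod.mk.injEq, List.cons.injEq, and_true, true_and]
          push_cast
          constructor <;> ring
        rw [hstep]
        rcases scanWordA_snd_space rest with hr | ⟨r', hr⟩
        · rw [hr]
          simp [goA]
        · rw [hr]
          have hlen : r'.length ≤ m := by
            have h1 := scanWordA_snd_length_le rest
            rw [hr] at h1
            simp at h1 h
            omega
          rw [show goA (' ' :: r') (pos + 1 + ((scanWordA rest).1.length : Int))
                = goA r' (pos + 1 + ((scanWordA rest).1.length : Int) + 1) by simp [goA]]
          rw [ih r' hlen,
            foldB_acc (mySplit r')
              [(String.ofList (c :: (scanWordA rest).1), pos, pos + 1 + ((scanWordA rest).1.length : Int))]]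
          simp

-- ===== VERDICT (by name: the statement is the Claim_ definition above) =====
theorem split_with_positions_py_spec : Claim_equal_split_with_positions_py := by
  intro text _
  show split_with_positions_py text = split_with_positions_py_alt text
  rw [split_with_positions_py, alt_eq_fold,
    goA_eq_fold text.toList.length text.toList (le_refl _) 0]
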